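-- pv_equiv track=rewrite | github.com/patrick330602/UST-Frontier | stringcom.py | LZW
-- ===== SOURCE A (Python) =====
-- def LZW(inp):
--     temp = inp
--     count = 0
--     word_dict = []
--     inp_list = list(inp)        # convert string to list
--     for ch in inp_list:
--         if ch not in word_dict:
--             word_dict.append(ch)
--     p = inp_list[0]
--     inp_list.pop(0)
--     for chrs in inp_list:
--         tmp = p + chrs
--         if tmp in word_dict:
--             p = p + chrs
--         else:
--             word_dict.append(p+chrs)
--             count += 1
--             p = chrs
--     count *= 12
--     return count
-- ===== SOURCE B (Python) =====
-- def LZW(inp):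
--     # LZW phrase count via a trie of (node_id, char) -> child_id edges; root is node 0.
--     trie = {}
--     next_id = 1
--
--     def child(node, ch):
--         nonlocal next_id
--         key = (node, ch)
--         if key not in trie:
--             trie[key] = next_id
--             next_id += 1
--         return trie[key]
--
--     node = child(0, inp[0])
--     count = 0
--     for ch in inp[1:]:
--         key = (node, ch)
--         if key in trie:
--             node = trie[key]
--         else:
--             trie[key] = next_id
--             next_id += 1
--             count += 1
--             node = child(0, ch)
--     return count * 12
-- ===== Notes on version B (the rewrite author's own statement) =====
-- stated objective: faster
-- what changed: Replaces A's list of phrase strings with linear-scan membership and string concatenation by an LZW trie of (node_id, char) edges in a dict, so each step is one O(1) key lookup instead of scanning the growing phrase list against a growing string.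
import Mathlib
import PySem

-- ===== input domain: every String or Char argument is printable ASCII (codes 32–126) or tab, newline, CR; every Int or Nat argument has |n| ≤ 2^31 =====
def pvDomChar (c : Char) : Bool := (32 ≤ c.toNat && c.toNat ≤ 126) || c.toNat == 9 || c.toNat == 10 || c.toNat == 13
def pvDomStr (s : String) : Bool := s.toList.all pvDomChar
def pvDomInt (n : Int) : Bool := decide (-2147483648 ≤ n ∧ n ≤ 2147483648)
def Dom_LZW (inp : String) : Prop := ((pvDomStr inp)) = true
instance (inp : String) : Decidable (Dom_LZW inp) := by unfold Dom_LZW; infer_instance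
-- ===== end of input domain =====

-- B replaces A's growing list of phrase strings (linear scans, growing concatenations) by an
-- LZW trie of (node_id, char) → child_id edges stored in a dict: one key lookup per character.

-- ===== PORT A =====
-- Python strings are represented as List Char throughout (kernel-transparent).
def pvStepA (st : List Char × List (List Char) × Int) (chrs : Char) :
    List Char × List (List Char) × Int :=
  let tmp := st.1 ++ [chrs]
  if tmp ∈ st.2.1 then (tmp, st.2.1, st.2.2)
  else ([chrs], st.2.1 ++ [tmp], st.2.2 + 1)

def LZW (inp : String) : Int :=
  let inp_list := inp.toList
  let word_dict := inp_list.foldl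
    (fun wd ch => if [ch] ∈ wd then wd else wd ++ [[ch]]) ([] : List (List Char))
  match inp_list with
  | [] => 0   -- Python raises IndexError here (inp_list[0]); excluded by Pre_LZW
  | p0 :: rest =>
      let st := rest.foldl pvStepA ([p0], word_dict, 0)
      st.2.2 * 12

-- ===== PORT B =====
-- child(node, ch): get-or-create the edge in the trie, returns (trie', next_id', child_id)
def pvChild (trie : PySem.Dict (Int × Char) Int) (nid node : Int) (ch : Char) :
    PySem.Dict (Int × Char) Int × Int × Int :=
  match trie.get? (node, ch) with
  | some m => (trie, nid, m)
  | none => (trie.insert (node, ch) nid, nid + 1, nid)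

def pvStepB (st : PySem.Dict (Int × Char) Int × Int × Int × Int) (ch : Char) :
    PySem.Dict (Int × Char) Int × Int × Int × Int :=
  match st.1.get? (st.2.2.1, ch) with
  | some m => (st.1, st.2.1, m, st.2.2.2)
  | none =>
      let s := pvChild (st.1.insert (st.2.2.1, ch) st.2.1) (st.2.1 + 1) 0 ch
      (s.1, s.2.1, s.2.2, st.2.2.2 + 1)

def LZW_alt (inp : String) : Int :=
  match inp.toList with
  | [] => 0   -- Python raises IndexError here (inp[0]); excluded by Pre_LZW
  | c0 :: rest =>
      let s0 := pvChild PySem.Dict.empty 1 0 c0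
      let st := rest.foldl pvStepB (s0.1, s0.2.1, s0.2.2, 0)
      st.2.2.2 * 12

-- ===== PRECONDITION & SPEC =====
-- Pre_ excludes only the empty string, on which both Pythons raise IndexError.
def Pre_LZW (inp : String) : Prop := inp.toList ≠ []
instance (inp : String) : Decidable (Pre_LZW inp) := by unfold Pre_LZW; infer_instance
def pvWitness_LZW : String := "abab"

def Spec_LZW (inp : String) (out : Int) : Prop := out = LZW_alt inp
instance (inp : String) (out : Int) : Decidable (Spec_LZW inp out) := by unfold Spec_LZW; infer_instance

-- ===== CLAIM (what is proved, stated in full; the proofs are below) =====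
def Claim_equal_LZW : Prop := ∀ (inp : String), Dom_LZW inp → Pre_LZW inp → Spec_LZW inp (LZW inp)

-- ===== LEMMAS AND PROOFS =====

-- the string spelled by trie node n (ghost list ns: node m ↔ ns[m-1]; node 0 is the root "")
def pvNstr (ns : List (List Char)) (n : Int) : List Char :=
  if n = 0 then [] else ns.getD (n - 1).toNat []

-- the simulation invariant between A's state (wd, p) and B's state (trie, nid, node)
structure PvInv (wd : List (List Char)) (p : List Char)
    (trie : PySem.Dict (Int × Char) Int) (nid node : Int)
    (ns : List (List Char)) : Prop where
  hnid : nid = (ns.length : Int) + 1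
  hnode : 1 ≤ node ∧ node ≤ (ns.length : Int)
  hp : pvNstr ns node = p
  hne : ∀ m : Int, 1 ≤ m → m ≤ (ns.length : Int) → pvNstr ns m ≠ []
  hedge : ∀ n c m, trie.get? (n, c) = some m →
      0 ≤ n ∧ n ≤ (ns.length : Int) ∧ 1 ≤ m ∧ m ≤ (ns.length : Int) ∧
      pvNstr ns m = pvNstr ns n ++ [c]
  hsurj : ∀ m : Int, 1 ≤ m → m ≤ (ns.length : Int) → ∃ n c, trie.get? (n, c) = some m
  hinj : ∀ m m' : Int, 1 ≤ m → m ≤ (ns.length : Int) → 1 ≤ m' → m' ≤ (ns.length : Int) →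
      pvNstr ns m = pvNstr ns m' → m = m'
  hmem1 : ∀ n c, (trie.get? (n, c)).isSome = true → pvNstr ns n ++ [c] ∈ wd
  hmem2 : ∀ s ∈ wd, 2 ≤ s.length →
      ∃ n c, 1 ≤ n ∧ (trie.get? (n, c)).isSome = true ∧ s = pvNstr ns n ++ [c]

lemma pvNstr_zero (ns : List (List Char)) : pvNstr ns 0 = [] := by simp [pvNstr]

lemma pvNstr_append_old (ns ts : List (List Char)) (m : Int)
    (h1 : 1 ≤ m) (h2 : m ≤ (ns.length : Int)) : pvNstr (ns ++ ts) m = pvNstr ns m := by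
  unfold pvNstr
  rw [if_neg (by omega), if_neg (by omega), List.getD_append]
  omega

lemma pvNstr_pres (ns ts : List (List Char)) (m : Int)
    (h1 : 0 ≤ m) (h2 : m ≤ (ns.length : Int)) : pvNstr (ns ++ ts) m = pvNstr ns m := by
  rcases eq_or_lt_of_le h1 with h | h
  · rw [← h, pvNstr_zero, pvNstr_zero]
  · exact pvNstr_append_old ns ts m (by omega) h2

lemma pvNstr_last (ns : List (List Char)) (t : List Char) :
    pvNstr (ns ++ [t]) ((ns.length : Int) + 1) = t := by
  unfold pvNstr
  rw [if_neg (by omega)]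
  have h : ((ns.length : Int) + 1 - 1).toNat = ns.length := by omega
  rw [h]
  simp [List.getD]

-- the membership test A performs is exactly B's trie lookup at the current node
lemma pv_lookup_iff (wd : List (List Char)) (p : List Char)
    (trie : PySem.Dict (Int × Char) Int) (nid node : Int) (ns : List (List Char))
    (hI : PvInv wd p trie nid node ns) (ch : Char) :
    (trie.get? (node, ch)).isSome = true ↔ (p ++ [ch]) ∈ wd := by
  constructor
  · intro h
    have := hI.hmem1 node ch h
    rwa [hI.hp] at this
  · intro h
    have hpne : p ≠ [] := by
      have := hI.hne node hI.hnode.1 hI.hnode.2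
      rwa [hI.hp] at this
    have hlen : 2 ≤ (p ++ [ch]).length := by
      rcases p with _ | ⟨x, xs⟩
      · exact absurd rfl hpne
      · simp
    obtain ⟨n, c, hn1, hsome, heq⟩ := hI.hmem2 _ h hlen
    obtain ⟨m, hm⟩ := Option.isSome_iff_exists.mp hsome
    have hb := hI.hedge n c m hm
    have hcc : pvNstr ns n = p ∧ c = ch := by
      have h2 := List.append_inj' heq.symm rfl
      exact ⟨h2.1, by simpa using h2.2⟩
    have hnn : n = node := hI.hinj n node hn1 hb.2.1 hI.hnode.1 hI.hnode.2 (by rw [hcc.1, hI.hp])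
    rw [hnn, hcc.2] at hm
    simp [hm]

-- one loop step preserves the invariant and keeps the two counters equal
lemma pv_step (wd : List (List Char)) (p : List Char)
    (trie : PySem.Dict (Int × Char) Int) (nid node : Int) (ns : List (List Char))
    (count : Int) (ch : Char)
    (hI : PvInv wd p trie nid node ns) (hch : [ch] ∈ wd) :
    ∃ ns',
      PvInv (pvStepA (p, wd, count) ch).2.1 (pvStepA (p, wd, count) ch).1
        (pvStepB (trie, nid, node, count) ch).1
        (pvStepB (trie, nid, node, count) ch).2.1
        (pvStepB (trie, nid, node, count) ch).2.2.1 ns' ∧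
      (pvStepA (p, wd, count) ch).2.2 = (pvStepB (trie, nid, node, count) ch).2.2.2 ∧
      wd ⊆ (pvStepA (p, wd, count) ch).2.1 := by
  have hpne : p ≠ [] := by
    have := hI.hne node hI.hnode.1 hI.hnode.2
    rwa [hI.hp] at this
  have hnidT : nid = (ns.length : Int) + 1 := hI.hnid
  have hndT1 : 1 ≤ node := hI.hnode.1
  have hndT2 : node ≤ (ns.length : Int) := hI.hnode.2
  cases hg : trie.get? (node, ch) with
  | some m =>
    have hmemA : (p ++ [ch]) ∈ wd :=
      (pv_lookup_iff wd p trie nid node ns hI ch).mp (by rw [hg]; rfl)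
    have hb := hI.hedge node ch m hg
    refine ⟨ns, ?_, ?_, ?_⟩
    · simp only [pvStepA, pvStepB, hg, if_pos hmemA]
      exact { hnid := hI.hnid, hnode := ⟨hb.2.2.1, hb.2.2.2.1⟩,
              hp := by rw [hb.2.2.2.2, hI.hp], hne := hI.hne, hedge := hI.hedge,
              hsurj := hI.hsurj, hinj := hI.hinj, hmem1 := hI.hmem1, hmem2 := hI.hmem2 }
    · simp only [pvStepA, pvStepB, hg, if_pos hmemA]
    · simp only [pvStepA, if_pos hmemA]
      exact fun _ h => h
  | none =>
    have hmemA : (p ++ [ch]) ∉ wd := by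
      intro h
      have := (pv_lookup_iff wd p trie nid node ns hI ch).mpr h
      rw [hg] at this
      simp at this
    have hne0 : ((0 : Int), ch) ≠ (node, ch) := by
      intro h
      have := congrArg Prod.fst h
      simp at this
      omega
    have hget10 : (trie.insert (node, ch) nid).get? (0, ch) = trie.get? (0, ch) :=
      PySem.Dict.get?_insert_of_ne _ _ hne0
    -- characterization of lookups in trie.insert (node,ch) nid
    have hget1 : ∀ n c m', (trie.insert (node, ch) nid).get? (n, c) = some m' →
        ((n, c) = (node, ch) ∧ m' = nid) ∨
        ((n, c) ≠ (node, ch) ∧ trie.get? (n, c) = some m') := by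
      intro n c m' h
      by_cases hk : ((n, c) : Int × Char) = (node, ch)
      · left
        rw [hk, PySem.Dict.get?_insert_self] at h
        exact ⟨hk, (Option.some.inj h).symm⟩
      · right
        rw [PySem.Dict.get?_insert_of_ne _ _ hk] at h
        exact ⟨hk, h⟩
    have hold1 : ∀ n c m', trie.get? (n, c) = some m' →
        (trie.insert (node, ch) nid).get? (n, c) = some m' := by
      intro n c m' h
      have hk : ((n, c) : Int × Char) ≠ (node, ch) := by
        intro he; rw [he, hg] at h; simp at h
      rw [PySem.Dict.get?_insert_of_ne _ _ hk]; exact h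
    have htlen : 2 ≤ (p ++ [ch]).length := by
      rcases p with _ | ⟨x, xs⟩
      · exact absurd rfl hpne
      · simp
    cases hg0 : trie.get? (0, ch) with
    | some m =>
      -- the singleton node for ch already exists: only one new node (for (p ++ [ch]))
      have hb0 := hI.hedge 0 ch m hg0
      refine ⟨ns ++ [(p ++ [ch])], ?_, ?_, ?_⟩
      · simp only [pvStepA, pvStepB, hg, if_neg hmemA, pvChild, hget10, hg0]
        have hL : ((ns ++ [(p ++ [ch])]).length : Int) = (ns.length : Int) + 1 := by simp
        refine
          { hnid := by simp only [List.length_append, List.length_cons, List.length_nil]; omega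
            hnode := ⟨hb0.2.2.1, by rw [hL]; have := hb0.2.2.2.1; omega⟩
            hp := by
              rw [pvNstr_append_old ns [(p ++ [ch])] m hb0.2.2.1 hb0.2.2.2.1, hb0.2.2.2.2, pvNstr_zero]
              rfl
            hne := ?_, hedge := ?_, hsurj := ?_, hinj := ?_, hmem1 := ?_, hmem2 := ?_ }
        · intro m' h1 h2
          rw [hL] at h2
          rcases lt_or_eq_of_le h2 with h2 | h2
          · rw [pvNstr_append_old ns [(p ++ [ch])] m' h1 (by omega)]
            exact hI.hne m' h1 (by omega)
          · rw [h2, pvNstr_last]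
            intro he; rw [he] at htlen; simp at htlen
        · intro n c m' h
          rcases hget1 n c m' h with ⟨hk, hm'⟩ | ⟨hk, h⟩
          · obtain ⟨hn, hc⟩ := Prod.mk.injEq .. ▸ hk
            rw [hn, hc, hm']
            have hnidL : nid = (ns.length : Int) + 1 := hI.hnid
            refine ⟨by omega, by rw [hL]; omega, by omega, by rw [hL]; omega, ?_⟩
            rw [hnidL, pvNstr_last,
              pvNstr_append_old ns [(p ++ [ch])] node hI.hnode.1 hI.hnode.2, hI.hp]
          · have hb := hI.hedge n c m' h
            refine ⟨hb.1, by rw [hL]; omega, hb.2.2.1, by rw [hL]; omega, ?_⟩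
            rw [pvNstr_append_old ns [(p ++ [ch])] m' hb.2.2.1 hb.2.2.2.1,
              pvNstr_pres ns [(p ++ [ch])] n hb.1 hb.2.1]
            exact hb.2.2.2.2
        · intro m' h1 h2
          rw [hL] at h2
          rcases lt_or_eq_of_le h2 with h2 | h2
          · obtain ⟨n, c, he⟩ := hI.hsurj m' h1 (by omega)
            exact ⟨n, c, hold1 n c m' he⟩
          · refine ⟨node, ch, ?_⟩
            rw [h2, ← hI.hnid]
            exact PySem.Dict.get?_insert_self ..
        · intro m1 m2 h11 h12 h21 h22 heq
          rw [hL] at h12 h22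
          have key : ∀ k : Int, 1 ≤ k → k ≤ (ns.length : Int) →
              pvNstr (ns ++ [(p ++ [ch])]) k ≠ (p ++ [ch]) := by
            intro k hk1 hk2 hkeq
            rw [pvNstr_append_old ns [(p ++ [ch])] k hk1 hk2] at hkeq
            obtain ⟨n, c, he⟩ := hI.hsurj k hk1 hk2
            have hb := hI.hedge n c k he
            rw [hkeq] at hb
            have hcc : pvNstr ns n = p ∧ c = ch := by
              have h2 := List.append_inj' hb.2.2.2.2 rfl
              exact ⟨h2.1.symm, by simpa using h2.2.symm⟩
            have hn0 : 1 ≤ n := by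
              rcases eq_or_lt_of_le hb.1 with h0 | h0
              · exfalso; rw [← h0, pvNstr_zero] at hcc; exact hpne hcc.1.symm
              · omega
            have : n = node := hI.hinj n node hn0 hb.2.1 hI.hnode.1 hI.hnode.2
              (by rw [hcc.1, hI.hp])
            rw [this, hcc.2, hg] at he
            simp at he
          rcases lt_or_eq_of_le h12 with h12 | h12 <;> rcases lt_or_eq_of_le h22 with h22 | h22
          · rw [pvNstr_append_old ns [(p ++ [ch])] m1 h11 (by omega),
              pvNstr_append_old ns [(p ++ [ch])] m2 h21 (by omega)] at heq
            exact hI.hinj m1 m2 h11 (by omega) h21 (by omega) heq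
          · exfalso
            rw [h22, pvNstr_last] at heq
            exact key m1 h11 (by omega) heq
          · exfalso
            rw [h12, pvNstr_last] at heq
            exact key m2 h21 (by omega) heq.symm
          · omega
        · intro n c h
          obtain ⟨m', hm'⟩ := Option.isSome_iff_exists.mp h
          rcases hget1 n c m' hm' with ⟨hk, _⟩ | ⟨_, hold⟩
          · obtain ⟨hn, hc⟩ := Prod.mk.injEq .. ▸ hk
            rw [hn, hc]
            rw [pvNstr_append_old ns [(p ++ [ch])] node hI.hnode.1 hI.hnode.2, hI.hp]
            exact List.mem_append_right _ (by simp)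
          · have hb := hI.hedge n c m' hold
            rw [pvNstr_pres ns [(p ++ [ch])] n hb.1 hb.2.1]
            exact List.mem_append_left _ (hI.hmem1 n c (by rw [hold]; rfl))
        · intro s hs hslen
          rcases List.mem_append.mp hs with hs | hs
          · obtain ⟨n, c, hn1, hsome, heq⟩ := hI.hmem2 s hs hslen
            obtain ⟨m', hm'⟩ := Option.isSome_iff_exists.mp hsome
            have hb := hI.hedge n c m' hm'
            refine ⟨n, c, hn1, by rw [hold1 n c m' hm']; rfl, ?_⟩
            rw [pvNstr_pres ns [(p ++ [ch])] n hb.1 hb.2.1]; exact heq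
          · simp only [List.mem_singleton] at hs
            refine ⟨node, ch, hI.hnode.1, ?_, ?_⟩
            · rw [PySem.Dict.get?_insert_self]; rfl
            · rw [pvNstr_append_old ns [(p ++ [ch])] node hI.hnode.1 hI.hnode.2, hI.hp, hs]
      · simp only [pvStepA, pvStepB, hg, if_neg hmemA, pvChild, hget10, hg0]
      · simp only [pvStepA, if_neg hmemA]
        exact fun x h => List.mem_append_left _ h
    | none =>
      -- two new nodes: (p ++ [ch]) and the singleton [ch]
      refine ⟨(ns ++ [(p ++ [ch])]) ++ [[ch]], ?_, ?_, ?_⟩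
      · simp only [pvStepA, pvStepB, hg, if_neg hmemA, pvChild, hget10, hg0]
        have hnidL : nid = (ns.length : Int) + 1 := hI.hnid
        have hL : (((ns ++ [(p ++ [ch])]) ++ [[ch]]).length : Int) = (ns.length : Int) + 2 := by simp
        have hne0' : ∀ n c m', trie.get? (n, c) = some m' → ((n, c) : Int × Char) ≠ (0, ch) := by
          intro n c m' h he; rw [he, hg0] at h; simp at h
        -- lookups in trie2 = (trie.insert (node,ch) nid).insert (0,ch) (nid+1)
        have hget2 : ∀ n c m',
            (((trie.insert (node, ch) nid).insert (0, ch) (nid + 1)).get? (n, c) = some m') →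
            ((n, c) = ((0 : Int), ch) ∧ m' = nid + 1) ∨
            ((n, c) = (node, ch) ∧ m' = nid) ∨
            (((n, c) : Int × Char) ≠ (0, ch) ∧ (n, c) ≠ (node, ch) ∧ trie.get? (n, c) = some m') := by
          intro n c m' h
          by_cases hk0 : ((n, c) : Int × Char) = (0, ch)
          · left
            rw [hk0, PySem.Dict.get?_insert_self] at h
            exact ⟨hk0, (Option.some.inj h).symm⟩
          · rw [PySem.Dict.get?_insert_of_ne _ _ hk0] at h
            rcases hget1 n c m' h with ⟨hk, hm'⟩ | ⟨hk, h⟩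
            · right; left; exact ⟨hk, hm'⟩
            · right; right; exact ⟨hk0, hk, h⟩
        have hold2 : ∀ n c m', trie.get? (n, c) = some m' →
            (((trie.insert (node, ch) nid).insert (0, ch) (nid + 1)).get? (n, c) = some m') := by
          intro n c m' h
          rw [PySem.Dict.get?_insert_of_ne _ _ (hne0' n c m' h)]
          exact hold1 n c m' h
        have hstr_tmp : pvNstr ((ns ++ [(p ++ [ch])]) ++ [[ch]]) ((ns.length : Int) + 1) = (p ++ [ch]) := by
          rw [pvNstr_append_old (ns ++ [(p ++ [ch])]) [[ch]] _ (by omega) (by simp),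
            pvNstr_last]
        have hstr_ch : pvNstr ((ns ++ [(p ++ [ch])]) ++ [[ch]]) ((ns.length : Int) + 2) = [ch] := by
          have h2 : ((ns.length : Int) + 2) = (((ns ++ [(p ++ [ch])]).length : Int) + 1) := by
            simp
            ring
          rw [h2, pvNstr_last]
        have hstr_old : ∀ k : Int, 0 ≤ k → k ≤ (ns.length : Int) →
            pvNstr ((ns ++ [(p ++ [ch])]) ++ [[ch]]) k = pvNstr ns k := by
          intro k h1 h2
          rw [pvNstr_pres (ns ++ [(p ++ [ch])]) [[ch]] k h1 (by simp; omega),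
            pvNstr_pres ns [(p ++ [ch])] k h1 h2]
        -- no old node spells (p ++ [ch])
        have key_tmp : ∀ k : Int, 1 ≤ k → k ≤ (ns.length : Int) → pvNstr ns k ≠ (p ++ [ch]) := by
          intro k hk1 hk2 hkeq
          obtain ⟨n, c, he⟩ := hI.hsurj k hk1 hk2
          have hb := hI.hedge n c k he
          rw [hkeq] at hb
          have hcc : pvNstr ns n = p ∧ c = ch := by
            have h2 := List.append_inj' hb.2.2.2.2 rfl
            exact ⟨h2.1.symm, by simpa using h2.2.symm⟩
          have hn0 : 1 ≤ n := by
            rcases eq_or_lt_of_le hb.1 with h0 | h0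
            · exfalso; rw [← h0, pvNstr_zero] at hcc; exact hpne hcc.1.symm
            · omega
          have : n = node := hI.hinj n node hn0 hb.2.1 hI.hnode.1 hI.hnode.2
            (by rw [hcc.1, hI.hp])
          rw [this, hcc.2, hg] at he
          simp at he
        -- no old node spells [ch]
        have key_ch : ∀ k : Int, 1 ≤ k → k ≤ (ns.length : Int) → pvNstr ns k ≠ [ch] := by
          intro k hk1 hk2 hkeq
          obtain ⟨n, c, he⟩ := hI.hsurj k hk1 hk2
          have hb := hI.hedge n c k he
          rw [hkeq] at hb
          have hcc : pvNstr ns n = [] ∧ c = ch := by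
            have h2 : pvNstr ns n ++ [c] = [] ++ [ch] := by simpa using hb.2.2.2.2.symm
            have h3 := List.append_inj' h2 rfl
            exact ⟨h3.1, by simpa using h3.2⟩
          have hn0 : n = 0 := by
            rcases eq_or_lt_of_le hb.1 with h0 | h0
            · omega
            · exfalso; exact hI.hne n (by omega) hb.2.1 hcc.1
          rw [hn0, hcc.2, hg0] at he
          simp at he
        have hnid1 : nid + 1 = (ns.length : Int) + 2 := by omega
        refine
          { hnid := by rw [hL]; omega
            hnode := by rw [hL]; omega
            hp := by rw [hnid1]; exact hstr_ch
            hne := ?_, hedge := ?_, hsurj := ?_, hinj := ?_, hmem1 := ?_, hmem2 := ?_ }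
        · intro m' h1 h2
          rw [hL] at h2
          rcases (by omega : m' ≤ (ns.length : Int) ∨ m' = (ns.length : Int) + 1 ∨
              m' = (ns.length : Int) + 2) with h | h | h
          · rw [hstr_old m' (by omega) h]; exact hI.hne m' h1 h
          · rw [h, hstr_tmp]; intro he; rw [he] at htlen; simp at htlen
          · rw [h, hstr_ch]; simp
        · intro n c m' h
          rcases hget2 n c m' h with ⟨hk, hm'⟩ | ⟨hk, hm'⟩ | ⟨_, _, hold⟩
          · obtain ⟨hn, hc⟩ := Prod.mk.injEq .. ▸ hk
            rw [hn, hc, hm']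
            refine ⟨le_refl 0, by rw [hL]; omega, by omega, by rw [hL]; omega, ?_⟩
            rw [hnid1, hstr_ch, pvNstr_zero]
            rfl
          · obtain ⟨hn, hc⟩ := Prod.mk.injEq .. ▸ hk
            rw [hn, hc, hm']
            refine ⟨by omega, by rw [hL]; omega, by omega, by rw [hL]; omega, ?_⟩
            rw [hnidL, hstr_tmp, hstr_old node (by omega) hI.hnode.2, hI.hp]
          · have hb := hI.hedge n c m' hold
            refine ⟨hb.1, by rw [hL]; omega, hb.2.2.1, by rw [hL]; omega, ?_⟩
            rw [hstr_old m' (by omega) hb.2.2.2.1, hstr_old n hb.1 hb.2.1]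
            exact hb.2.2.2.2
        · intro m' h1 h2
          rw [hL] at h2
          rcases (by omega : m' ≤ (ns.length : Int) ∨ m' = (ns.length : Int) + 1 ∨
              m' = (ns.length : Int) + 2) with h | h | h
          · obtain ⟨n, c, he⟩ := hI.hsurj m' h1 h
            exact ⟨n, c, hold2 n c m' he⟩
          · refine ⟨node, ch, ?_⟩
            have hk0 : ((node, ch) : Int × Char) ≠ (0, ch) := by
              intro he
              have := congrArg Prod.fst he
              simp at this
              have := hI.hnode.1
              omega
            rw [PySem.Dict.get?_insert_of_ne _ _ hk0, PySem.Dict.get?_insert_self, h, ← hnidL]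
            
          · refine ⟨0, ch, ?_⟩
            rw [PySem.Dict.get?_insert_self, h, ← hnid1]
        · intro m1 m2 h11 h12 h21 h22 heq
          rw [hL] at h12 h22
          have hcases : ∀ k : Int, 1 ≤ k → k ≤ (ns.length : Int) + 2 →
              (k ≤ (ns.length : Int) ∨ k = (ns.length : Int) + 1 ∨ k = (ns.length : Int) + 2) :=
            fun k _ h => by omega
          rcases hcases m1 h11 h12 with hA | hA | hA <;> rcases hcases m2 h21 h22 with hB | hB | hB
          · rw [hstr_old m1 (by omega) hA, hstr_old m2 (by omega) hB] at heq
            exact hI.hinj m1 m2 h11 hA h21 hB heq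
          · exfalso; rw [hstr_old m1 (by omega) hA, hB, hstr_tmp] at heq
            exact key_tmp m1 h11 hA heq
          · exfalso; rw [hstr_old m1 (by omega) hA, hB, hstr_ch] at heq
            exact key_ch m1 h11 hA heq
          · exfalso; rw [hstr_old m2 (by omega) hB, hA, hstr_tmp] at heq
            exact key_tmp m2 h21 hB heq.symm
          · omega
          · exfalso; rw [hA, hstr_tmp, hB, hstr_ch] at heq
            rw [heq] at htlen; simp at htlen
          · exfalso; rw [hstr_old m2 (by omega) hB, hA, hstr_ch] at heq
            exact key_ch m2 h21 hB heq.symm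
          · exfalso; rw [hA, hstr_ch, hB, hstr_tmp] at heq
            rw [← heq] at htlen; simp at htlen
          · omega
        · intro n c h
          obtain ⟨m', hm'⟩ := Option.isSome_iff_exists.mp h
          rcases hget2 n c m' hm' with ⟨hk, _⟩ | ⟨hk, _⟩ | ⟨_, _, hold⟩
          · obtain ⟨hn, hc⟩ := Prod.mk.injEq .. ▸ hk
            rw [hn, hc]
            rw [pvNstr_zero]
            exact List.mem_append_left _ hch
          · obtain ⟨hn, hc⟩ := Prod.mk.injEq .. ▸ hk
            rw [hn, hc]
            rw [hstr_old node (by omega) hI.hnode.2, hI.hp]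
            exact List.mem_append_right _ (by simp)
          · have hb := hI.hedge n c m' hold
            rw [hstr_old n hb.1 hb.2.1]
            exact List.mem_append_left _ (hI.hmem1 n c (by rw [hold]; rfl))
        · intro s hs hslen
          rcases List.mem_append.mp hs with hs | hs
          · obtain ⟨n, c, hn1, hsome, heq⟩ := hI.hmem2 s hs hslen
            obtain ⟨m', hm'⟩ := Option.isSome_iff_exists.mp hsome
            have hb := hI.hedge n c m' hm'
            refine ⟨n, c, hn1, by rw [hold2 n c m' hm']; rfl, ?_⟩
            rw [hstr_old n hb.1 hb.2.1]; exact heq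
          · simp only [List.mem_singleton] at hs
            refine ⟨node, ch, hI.hnode.1, ?_, ?_⟩
            · have hk0 : ((node, ch) : Int × Char) ≠ (0, ch) := by
                intro he
                have := congrArg Prod.fst he
                simp at this
                have := hI.hnode.1
                omega
              rw [PySem.Dict.get?_insert_of_ne _ _ hk0, PySem.Dict.get?_insert_self]; rfl
            · rw [hstr_old node (by omega) hI.hnode.2, hI.hp, hs]
      · simp only [pvStepA, pvStepB, hg, if_neg hmemA, pvChild, hget10, hg0]
      · simp only [pvStepA, if_neg hmemA]
        exact fun x h => List.mem_append_left _ h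

-- the two folds compute the same counter
lemma pv_fold (rest : List Char) :
    ∀ (wd : List (List Char)) (p : List Char)
      (trie : PySem.Dict (Int × Char) Int) (nid node : Int) (ns : List (List Char))
      (count : Int),
      PvInv wd p trie nid node ns →
      (∀ ch ∈ rest, [ch] ∈ wd) →
      (rest.foldl pvStepA (p, wd, count)).2.2 =
        (rest.foldl pvStepB (trie, nid, node, count)).2.2.2 := by
  induction rest with
  | nil => intro _ _ _ _ _ _ _ _ _; rfl
  | cons ch rest ih =>
    intro wd p trie nid node ns count hI hall
    obtain ⟨ns', hI', hcnt, hsub⟩ := pv_step wd p trie nid node ns count ch hI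
      (hall ch List.mem_cons_self)
    simp only [List.foldl_cons]
    have hB : pvStepB (trie, nid, node, count) ch
        = ((pvStepB (trie, nid, node, count) ch).1, (pvStepB (trie, nid, node, count) ch).2.1,
           (pvStepB (trie, nid, node, count) ch).2.2.1, (pvStepA (p, wd, count) ch).2.2) := by
      rw [hcnt]
    rw [hB]
    exact ih (pvStepA (p, wd, count) ch).2.1 (pvStepA (p, wd, count) ch).1
      (pvStepB (trie, nid, node, count) ch).1 (pvStepB (trie, nid, node, count) ch).2.1
      (pvStepB (trie, nid, node, count) ch).2.2.1 ns' (pvStepA (p, wd, count) ch).2.2 hI'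
      (fun c hc => hsub (hall c (List.mem_cons_of_mem _ hc)))

-- the preloaded word_dict contains every singleton of the input
lemma pv_preload_mem (l : List Char) :
    ∀ (wd : List (List Char)) (ch : Char), ch ∈ l ∨ [ch] ∈ wd →
      [ch] ∈ l.foldl (fun wd ch => if [ch] ∈ wd then wd else wd ++ [[ch]]) wd := by
  induction l with
  | nil => intro wd ch h; simpa using h
  | cons x l ih =>
    intro wd ch h
    simp only [List.foldl_cons]
    by_cases hx : [x] ∈ wd
    · rw [if_pos hx]
      apply ih
      rcases h with h | h
      · rcases List.mem_cons.mp h with h | h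
        · right; rwa [h]
        · left; exact h
      · right; exact h
    · rw [if_neg hx]
      apply ih
      rcases h with h | h
      · rcases List.mem_cons.mp h with h | h
        · right; subst h; simp
        · left; exact h
      · right; simp [h]

-- the preloaded word_dict contains only singletons
lemma pv_preload_len (l : List Char) :
    ∀ (wd : List (List Char)), (∀ s ∈ wd, s.length = 1) →
      ∀ s ∈ l.foldl (fun wd ch => if [ch] ∈ wd then wd else wd ++ [[ch]]) wd,
        s.length = 1 := by
  induction l with
  | nil => intro wd h; exact h
  | cons x l ih =>
    intro wd h
    simp only [List.foldl_cons]
    by_cases hx : [x] ∈ wd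
    · rw [if_pos hx]; exact ih wd h
    · rw [if_neg hx]
      apply ih
      intro s hs
      rcases List.mem_append.mp hs with hs | hs
      · exact h s hs
      · simp at hs; simp [hs]

-- ===== VERDICT (by name: the statement is the Claim_ definition above) =====
theorem LZW_spec : Claim_equal_LZW := by
  intro inp _ hpre
  unfold Spec_LZW LZW LZW_alt
  cases h : inp.toList with
  | nil => exact absurd h hpre
  | cons c0 rest =>
    have hempty : (PySem.Dict.empty : PySem.Dict (Int × Char) Int).get? (0, c0) = none := by
      simp [PySem.Dict.get?, PySem.Dict.empty]
    simp only [pvChild, hempty]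
    set wd0 := (c0 :: rest).foldl
      (fun wd ch => if [ch] ∈ wd then wd else wd ++ [[ch]]) ([] : List (List Char)) with hwd0
    have hget0 : ∀ (k : Int × Char) (m : Int),
        ((PySem.Dict.empty : PySem.Dict (Int × Char) Int).insert (0, c0) 1).get? k = some m →
        k = (0, c0) ∧ m = 1 := by
      intro k m hk
      by_cases he : k = ((0 : Int), c0)
      · rw [he, PySem.Dict.get?_insert_self] at hk
        exact ⟨he, (Option.some.inj hk).symm⟩
      · rw [PySem.Dict.get?_insert_of_ne _ _ he] at hk
        simp [PySem.Dict.get?, PySem.Dict.empty] at hk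
    have hI : PvInv wd0 [c0] ((PySem.Dict.empty : PySem.Dict (Int × Char) Int).insert (0, c0) 1)
        (1 + 1) 1 [[c0]] := by
      refine
        { hnid := by simp
          hnode := by simp
          hp := by simp [pvNstr]
          hne := ?_, hedge := ?_, hsurj := ?_, hinj := ?_, hmem1 := ?_, hmem2 := ?_ }
      · intro m h1 h2
        simp only [List.length_cons, List.length_nil] at h2
        have : m = 1 := by omega
        simp [this, pvNstr]
      · intro n c m hk
        obtain ⟨hkk, hm⟩ := hget0 (n, c) m hk
        obtain ⟨hn, hc⟩ := Prod.mk.injEq .. ▸ hkk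
        rw [hn, hc]; subst hm
        refine ⟨le_refl 0, by simp, by omega, by simp, by simp [pvNstr]⟩
      · intro m h1 h2
        simp only [List.length_cons, List.length_nil] at h2
        refine ⟨0, c0, ?_⟩
        rw [PySem.Dict.get?_insert_self]
        congr 1
        omega
      · intro m m' h1 h2 h3 h4 _
        simp only [List.length_cons, List.length_nil] at h2 h4
        omega
      · intro n c hk
        obtain ⟨m, hm⟩ := Option.isSome_iff_exists.mp hk
        obtain ⟨hkk, _⟩ := hget0 (n, c) m hm
        obtain ⟨hn, hc⟩ := Prod.mk.injEq .. ▸ hkk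
        rw [hn, hc]
        rw [pvNstr_zero]
        exact pv_preload_mem (c0 :: rest) [] c0 (Or.inl List.mem_cons_self)
      · intro s hs hslen
        exfalso
        have := pv_preload_len (c0 :: rest) [] (by simp) s hs
        omega
    have hall : ∀ ch ∈ rest, [ch] ∈ wd0 := fun ch hc =>
      pv_preload_mem (c0 :: rest) [] ch (Or.inl (List.mem_cons_of_mem _ hc))
    have := pv_fold rest wd0 [c0]
      ((PySem.Dict.empty : PySem.Dict (Int × Char) Int).insert (0, c0) 1) (1 + 1) 1 [[c0]] 0 hI hall
    rw [this]
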